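-- pv_equiv track=rewrite | github.com/pypi-data/pypi-mirror-391 | packages/ugit-cli/ugit_cli-2.0.0.tar.gz/ugit_cli-2.0.0/ugit/commands/tag.py | _is_valid_tag_name
-- ===== SOURCE A (Python) =====
-- def _is_valid_tag_name(name: str) -> bool:
--     """
--     Validate tag name.
--
--     Args:
--         name: Tag name to validate
--
--     Returns:
--         True if valid tag name
--     """
--     if not name or not isinstance(name, str):
--         return False
--
--     # Similar to branch names but can contain dots
--     if name.startswith(".") or name.endswith(".lock"):
--         return False
--
--     if ".." in name:
--         return False
--
--     # Check for invalid characters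
--     invalid_chars = ["~", "^", ":", "?", "*", "[", " ", "\\", "@", "{", "}"]
--     for char in invalid_chars:
--         if char in name:
--             return False
--
--     # Check for control characters
--     if any(ord(c) < 32 for c in name):
--         return False
--
--     return True
-- ===== SOURCE B (Python) =====
-- _INVALID = frozenset("~^:?*[ \\@{}")
--
--
-- def _is_valid_tag_name(name: str) -> bool:
--     """Validate tag name with a single-pass state machine.
--
--     One left-to-right scan with a previous-character state replaces A's staged
--     startswith / ".." substring / per-character scans: a '.' sentinel for prev
--     makes a leading '.' fall out of the same consecutive-dot rule as '..'.
--     The '.lock' suffix is the only positional check left, done at the end.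
--     """
--     if not name or not isinstance(name, str):
--         return False
--     prev = "."  # sentinel: a leading '.' behaves like a consecutive dot
--     for c in name:
--         if (c == "." and prev == ".") or c in _INVALID or ord(c) < 32:
--             return False
--         prev = c
--     return not name.endswith(".lock")
-- ===== Notes on version B (the rewrite author's own statement) =====
-- stated objective: alternative
-- what changed: A's staged checks (leading-dot prefix, consecutive-dot substring scan, eleven per-forbidden-character substring scans, then a control-character pass) are replaced by one left-to-right state machine over the characters carrying the previous character, with a dot sentinel so that a leading dot and a consecutive-dot pair fall out of one rule; only the lock-suffix test remains a separate positional check.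
import Mathlib
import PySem

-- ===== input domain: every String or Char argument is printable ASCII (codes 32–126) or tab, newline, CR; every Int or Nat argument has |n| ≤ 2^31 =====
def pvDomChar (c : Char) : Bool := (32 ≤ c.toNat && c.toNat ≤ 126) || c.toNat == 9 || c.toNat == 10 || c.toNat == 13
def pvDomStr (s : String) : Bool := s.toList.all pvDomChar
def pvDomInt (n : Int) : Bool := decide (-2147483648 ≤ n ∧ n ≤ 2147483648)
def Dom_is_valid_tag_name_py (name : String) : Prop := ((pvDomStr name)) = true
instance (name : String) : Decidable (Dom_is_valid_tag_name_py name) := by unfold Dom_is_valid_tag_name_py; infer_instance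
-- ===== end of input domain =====

-- B replaces A's staged checks (dot prefix, consecutive-dot substring scan, eleven
-- per-character substring scans, control-char pass) by ONE left-to-right state-machine
-- scan carrying the previous character (a dot sentinel makes a leading dot a
-- consecutive-dot case), with only the lock suffix checked afterwards (objective: alternative).

-- ===== PORT A =====
-- the 'for char in invalid_chars' loop with its early 'return False',
-- followed (when the loop falls through) by the control-character check
def is_valid_tag_name_py_loop (chars : List String) (name : String) : Bool :=
  match chars with
  | [] => if (name.toList.any (fun c => c.toNat < 32)) then false else true
  | ch :: rest => if PySem.Str.isIn ch name then false else is_valid_tag_name_py_loop rest name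

def is_valid_tag_name_py (name : String) : Bool :=
  if name.toList.isEmpty then false
  else if PySem.Str.startswith name "." || PySem.Str.endswith name ".lock" then false
  else if PySem.Str.isIn ".." name then false
  else is_valid_tag_name_py_loop ["~", "^", ":", "?", "*", "[", " ", "\\", "@", "{", "}"] name

-- ===== PORT B =====
def pvInvalidSet : PySem.Set Char := PySem.Set.ofList "~^:?*[ \\@{}".toList

-- the 'for c in name' state-machine loop of Source B, carrying prev
def is_valid_tag_name_py_scan (prev : Char) (l : List Char) : Bool :=
  match l with
  | [] => true
  | c :: rest =>
    if (c == '.' && prev == '.') || PySem.Set.contains pvInvalidSet c || c.toNat < 32 then false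
    else is_valid_tag_name_py_scan c rest

def is_valid_tag_name_py_alt (name : String) : Bool :=
  if name.toList.isEmpty then false
  else if is_valid_tag_name_py_scan '.' name.toList then !(PySem.Str.endswith name ".lock")
  else false

-- ===== PRECONDITION & SPEC =====
def Spec_is_valid_tag_name_py (name : String) (out : Bool) : Prop := out = is_valid_tag_name_py_alt name
instance (name : String) (out : Bool) : Decidable (Spec_is_valid_tag_name_py name out) := by unfold Spec_is_valid_tag_name_py; infer_instance

-- ===== CLAIM (what is proved, stated in full; the proofs are below) =====
def Claim_equal_is_valid_tag_name_py : Prop := ∀ (name : String), Dom_is_valid_tag_name_py name → Spec_is_valid_tag_name_py name (is_valid_tag_name_py name)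

-- ===== LEMMAS AND PROOFS =====

-- proof-side: consecutive-dot detector (pair written in scan's check order)
def pvHasDD : List Char → Bool
  | c1 :: c2 :: t => (c2 == '.' && c1 == '.') || pvHasDD (c2 :: t)
  | _ => false

theorem hasDD_iff (l : List Char) : pvHasDD l = true ↔ ['.', '.'] <:+: l := by
  induction l with
  | nil => simp [pvHasDD]
  | cons c rest ih =>
    cases rest with
    | nil =>
      simp only [pvHasDD, Bool.false_eq_true, false_iff]
      intro h
      have := h.length_le
      simp at this
    | cons c2 t =>
      rw [List.infix_cons_iff]
      have hpre : ['.','.'] <+: c::c2::t ↔ c = '.' ∧ c2 = '.' := by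
        simp [List.cons_prefix_cons, eq_comm]
      simp only [pvHasDD, Bool.or_eq_true, Bool.and_eq_true, beq_iff_eq, ih, hpre]
      tauto

theorem isIn_dd (s : String) : PySem.Str.isIn ".." s = pvHasDD s.toList := by
  have hdd : (".." : String).toList = ['.', '.'] := rfl
  rcases h : pvHasDD s.toList with _ | _
  · simp only [PySem.Str.isIn_eq, hdd]
    rw [PySem.Chars.isIn_eq_false_iff]
    intro hinf
    exact absurd ((hasDD_iff _).mpr hinf) (by simp [h])
  · simp only [PySem.Str.isIn_eq, hdd]
    rw [PySem.Chars.isIn_iff_infix]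
    exact (hasDD_iff s.toList).mp h

-- 'lit in name' for a single-character string lit is membership of that character
theorem isIn_lit (lit : String) (c : Char) (h : lit.toList = [c]) (s : String) :
    PySem.Str.isIn lit s = s.toList.contains c := by
  simp only [PySem.Str.isIn_eq, h]
  rcases hc : (s.toList).contains c with _ | _
  · rw [PySem.Chars.isIn_eq_false_iff]
    intro hinf
    have : c ∈ s.toList := hinf.subset (by simp)
    simp_all
  · rw [PySem.Chars.isIn_iff_infix]
    have hm : c ∈ s.toList := by simp_all
    obtain ⟨l, r, he⟩ := List.mem_iff_append.mp hm
    exact ⟨l, r, by simp [he]⟩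

theorem any_or_split (l : List Char) (f g : Char → Bool) :
    l.any (fun x => f x || g x) = (l.any f || l.any g) := by
  induction l with
  | nil => rfl
  | cons a t ih => simp [List.any_cons, ih]; ac_rfl

theorem contains_invalid (c : Char) : PySem.Set.contains pvInvalidSet c =
    ((c == '~') || ((c == '^') || ((c == ':') || ((c == '?') || ((c == '*') || ((c == '[') ||
     ((c == ' ') || ((c == '\\') || ((c == '@') || ((c == '{') || (c == '}'))))))))))) := by
  have hset : pvInvalidSet = (['~','^',':','?','*','[',' ','\\','@','{','}'] : PySem.Set Char) := by decide
  rw [hset]; simp [PySem.Set.contains, Bool.beq_eq_decide_eq]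

theorem if_false_and_shape (b x : Bool) : (if b = true then false else x) = (!b && x) := by
  cases b <;> simp

-- A's char loop + control-char pass read together: "no bad character"
theorem loop_core (name : String) :
    is_valid_tag_name_py_loop ["~", "^", ":", "?", "*", "[", " ", "\\", "@", "{", "}"] name
      = !(name.toList.any (fun c => PySem.Set.contains pvInvalidSet c || decide (c.toNat < 32))) := by
  simp only [is_valid_tag_name_py_loop, isIn_lit "~" '~' rfl, isIn_lit "^" '^' rfl,
    isIn_lit ":" ':' rfl, isIn_lit "?" '?' rfl, isIn_lit "*" '*' rfl, isIn_lit "[" '[' rfl,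
    isIn_lit " " ' ' rfl, isIn_lit "\\" '\\' rfl, isIn_lit "@" '@' rfl, isIn_lit "{" '{' rfl,
    isIn_lit "}" '}' rfl, contains_invalid, any_or_split, List.any_beq']
  simp only [if_false_and_shape, Bool.not_or]
  simp [Bool.and_assoc]

-- B's scan read together: "no consecutive-dot pair in prev::l, no bad character in l"
theorem scan_core (l : List Char) : ∀ prev,
    is_valid_tag_name_py_scan prev l
      = (!pvHasDD (prev :: l) && !(l.any (fun c => PySem.Set.contains pvInvalidSet c || decide (c.toNat < 32)))) := by
  induction l with
  | nil => intro prev; simp [is_valid_tag_name_py_scan, pvHasDD]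
  | cons c rest ih =>
    intro prev
    simp only [is_valid_tag_name_py_scan, pvHasDD, List.any_cons, ih c]
    cases hA : (c == '.' && prev == '.') <;>
      cases hC : PySem.Set.contains pvInvalidSet c <;>
      cases hD : decide (c.toNat < 32) <;>
      simp

-- ===== VERDICT (by name: the statement is the Claim_ definition above) =====
theorem is_valid_tag_name_py_spec : Claim_equal_is_valid_tag_name_py := by
  intro name _
  unfold Spec_is_valid_tag_name_py is_valid_tag_name_py is_valid_tag_name_py_alt
  cases hl : name.toList with
  | nil => simp
  | cons c rest =>
    simp only [hl, List.isEmpty_cons, loop_core, scan_core, isIn_dd]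
    have hstart : PySem.Str.startswith name "." = (c == '.') := by
      simp [PySem.Str.startswith, PySem.Chars.startswith, hl, List.isPrefixOf, Bool.beq_comm]
    have hdd : pvHasDD ('.' :: c :: rest) = ((c == '.') || pvHasDD (c :: rest)) := by
      simp [pvHasDD]
    rw [hstart, hdd]
    cases c == '.' <;> cases PySem.Str.endswith name ".lock" <;>
      cases pvHasDD (c :: rest) <;>
      cases (c :: rest).any (fun c => PySem.Set.contains pvInvalidSet c || decide (c.toNat < 32)) <;> simp_all
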